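-- pv_equiv track=rewrite | github.com/k-blo/advent_of_code | 2021/day_12_passage_pathing.py | Visit_Check
-- ===== SOURCE A (Python) =====
-- def Visit_Check(next_cave, path):
--     if next_cave.isupper():
--         return True
--     else:
--         if next_cave not in path:
--             return True
--         else:
--             for small_cave in path:
--                 if small_cave.islower() and small_cave not in ["start", "end"]:
--                     if path.count(small_cave) > 1:
--                         return False
--             return True
-- ===== SOURCE B (Python) =====
-- def Visit_Check(next_cave, path):
--     if next_cave.isupper():
--         return True
--     if next_cave not in path:
--         return True
--     smalls = sorted(c for c in path if c.islower() and c not in ("start", "end"))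
--     return all(a != b for a, b in zip(smalls, smalls[1:]))
-- ===== Notes on version B (the rewrite author's own statement) =====
-- stated objective: alternative
-- what changed: Replaces A's nested scan (an inner path.count per small cave) by sort-then-adjacent-scan: sort the filtered small caves and declare the visit allowed iff no two adjacent sorted entries are equal.
import Mathlib
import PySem

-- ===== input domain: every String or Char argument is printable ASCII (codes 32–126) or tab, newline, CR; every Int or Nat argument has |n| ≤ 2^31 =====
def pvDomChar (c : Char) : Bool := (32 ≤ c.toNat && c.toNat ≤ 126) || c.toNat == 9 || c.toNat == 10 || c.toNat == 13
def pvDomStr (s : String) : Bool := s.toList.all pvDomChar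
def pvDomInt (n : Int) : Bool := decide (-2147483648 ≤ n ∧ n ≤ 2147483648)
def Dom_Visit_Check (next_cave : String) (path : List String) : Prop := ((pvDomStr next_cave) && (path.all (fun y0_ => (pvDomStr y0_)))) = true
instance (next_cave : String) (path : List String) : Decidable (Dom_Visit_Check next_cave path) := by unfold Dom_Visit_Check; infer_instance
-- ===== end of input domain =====

-- B replaces A's nested scan (inner path.count per small cave) by
-- sort-then-adjacent-scan over the filtered small caves (objective: alternative).

-- ===== PORT A =====
-- Python str.isupper()/str.islower(), exact on the ASCII domain: at least one
-- cased character and no cased character of the opposite case (ported by hand,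
-- PySem has only the Char-level predicates).
def pyStrIsupper (s : String) : Bool :=
  s.toList.any (fun c => PySem.Chars.isupper c || PySem.Chars.islower c) &&
    s.toList.all (fun c => !PySem.Chars.islower c)

def pyStrIslower (s : String) : Bool :=
  s.toList.any (fun c => PySem.Chars.isupper c || PySem.Chars.islower c) &&
    s.toList.all (fun c => !PySem.Chars.isupper c)

-- the 'for small_cave in path' loop of A, with the full path kept for .count
def visitLoop (full : List String) : List String → Bool
  | [] => true
  | c :: rest =>
    if pyStrIslower c && !(c == "start") && !(c == "end") then
      if PySem.List.count full c > 1 then false else visitLoop full rest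
    else visitLoop full rest

def Visit_Check (next_cave : String) (path : List String) : Bool :=
  if pyStrIsupper next_cave then true
  else if !(path.contains next_cave) then true
  else visitLoop path path

-- ===== PORT B =====
def Visit_Check_alt (next_cave : String) (path : List String) : Bool :=
  if pyStrIsupper next_cave then true
  else if !(path.contains next_cave) then true
  else
    let smalls := PySem.List.sorted
      (path.filter (fun c => pyStrIslower c && !(c == "start") && !(c == "end")))
      (fun x => x) false
    (smalls.zip (smalls.drop 1)).all (fun p => !(p.1 == p.2))

-- ===== PRECONDITION & SPEC =====
def Spec_Visit_Check (next_cave : String) (path : List String) (out : Bool) : Prop := out = Visit_Check_alt next_cave path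
instance (next_cave : String) (path : List String) (out : Bool) : Decidable (Spec_Visit_Check next_cave path out) := by unfold Spec_Visit_Check; infer_instance

-- ===== CLAIM (what is proved, stated in full; the proofs are below) =====
def Claim_equal_Visit_Check : Prop := ∀ (next_cave : String) (path : List String), Dom_Visit_Check next_cave path → Spec_Visit_Check next_cave path (Visit_Check next_cave path)

-- ===== LEMMAS AND PROOFS =====

-- on a ≤-sorted list, "no two adjacent entries equal" is exactly Nodup
lemma adj_distinct_iff_nodup {α : Type} [LinearOrder α] [DecidableEq α] (l : List α)
    (h : l.Pairwise (· ≤ ·)) :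
    ((l.zip (l.drop 1)).all (fun p => !(p.1 == p.2)) = true) ↔ l.Nodup := by
  induction l with
  | nil => simp
  | cons a t ih =>
    cases t with
    | nil => simp
    | cons b t' =>
      have hab : a ≤ b := (List.pairwise_cons.mp h).1 b (by simp)
      have hrest := (List.pairwise_cons.mp h).2
      have hb := List.pairwise_cons.mp hrest
      simp only [List.drop_succ_cons, List.drop_zero, List.zip_cons_cons, List.all_cons,
        Bool.and_eq_true, Bool.not_eq_true', beq_eq_false_iff_ne, ne_eq]
      simp only [List.drop_succ_cons, List.drop_zero] at ih
      rw [ih hrest]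
      constructor
      · rintro ⟨hne, hnd⟩
        refine List.nodup_cons.mpr ⟨?_, hnd⟩
        intro hmem
        rcases List.mem_cons.mp hmem with rfl | hmem'
        · exact hne rfl
        · have hlt : a < b := lt_of_le_of_ne hab hne
          exact absurd (lt_of_lt_of_le hlt (hb.1 a hmem')) (lt_irrefl a)
      · intro hnd
        have := List.nodup_cons.mp hnd
        exact ⟨fun hEq => this.1 (hEq ▸ List.mem_cons_self), this.2⟩

-- A's loop returns false exactly when some small cave in the remaining list
-- occurs more than once in the full path
lemma visitLoop_eq_all (full : List String) (rest : List String) :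
    visitLoop full rest =
      rest.all (fun c =>
        !(pyStrIslower c && !(c == "start") && !(c == "end")) || !(PySem.List.count full c > 1)) := by
  induction rest with
  | nil => rfl
  | cons c rest ih =>
    simp only [visitLoop, List.all_cons]
    split_ifs with h1 h2
    · rw [PySem.List.count_eq] at h2
      simp [h1]
      intro h
      exact absurd h2 (by omega)
    · rw [PySem.List.count_eq] at h2
      simp [h1, ih]
      intro _
      omega
    · simp [h1, ih]

-- A's loop over the whole path decides Nodup of the filtered small caves
lemma visitLoop_eq_nodup (path : List String) :
    visitLoop path path =
      decide (path.filter (fun c => pyStrIslower c && !(c == "start") && !(c == "end"))).Nodup := by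
  rw [visitLoop_eq_all, Bool.eq_iff_iff]
  simp only [List.all_eq_true, Bool.or_eq_true, Bool.not_eq_true', decide_eq_false_iff_not,
    not_lt, PySem.List.count_eq, decide_eq_true_eq]
  rw [List.nodup_iff_count_le_one]
  constructor
  · intro hall a
    by_cases ha : a ∈ path.filter (fun c => pyStrIslower c && !(c == "start") && !(c == "end"))
    · have hpa := (List.mem_filter.mp ha).2
      rw [List.count_filter (p := fun c => pyStrIslower c && !(c == "start") && !(c == "end")) hpa]
      rcases hall a (List.mem_filter.mp ha).1 with h | h
      · rw [h] at hpa; exact absurd hpa (by simp)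
      · exact h
    · simp [List.count_eq_zero_of_not_mem ha]
  · intro hlen c hc
    by_cases hpc : (pyStrIslower c && !(c == "start") && !(c == "end")) = true
    · right
      rw [← List.count_filter (p := fun c => pyStrIslower c && !(c == "start") && !(c == "end")) (l := path) hpc]
      exact hlen c
    · left
      exact Bool.not_eq_true _ ▸ hpc

-- ===== VERDICT (by name: the statement is the Claim_ definition above) =====
theorem Visit_Check_spec : Claim_equal_Visit_Check := by
  intro next_cave path _
  unfold Spec_Visit_Check Visit_Check Visit_Check_alt
  split_ifs with h1 h2
  · rfl
  · rfl
  · simp only []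
    set smalls := PySem.List.sorted
      (path.filter (fun c => pyStrIslower c && !(c == "start") && !(c == "end")))
      (fun x => x) false with hs
    have hpw : smalls.Pairwise (· ≤ ·) := by
      have := PySem.List.sorted_pairwise
        (path.filter (fun c => pyStrIslower c && !(c == "start") && !(c == "end")))
        (fun x => x)
      simpa [hs] using this
    have hperm : smalls.Perm (path.filter (fun c => pyStrIslower c && !(c == "start") && !(c == "end"))) := by
      simpa [hs] using PySem.List.sorted_perm
        (path.filter (fun c => pyStrIslower c && !(c == "start") && !(c == "end")))
        (fun x => x) false
    rw [visitLoop_eq_nodup, Bool.eq_iff_iff, decide_eq_true_eq, ← hperm.nodup_iff]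
    exact (adj_distinct_iff_nodup smalls hpw).symm
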